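-- pv_equiv track=rewrite | github.com/connor-lab/vapor | pyvapor/dbg.py | get_weight_array_gaps
-- ===== SOURCE A (Python) =====
-- def get_weight_array_gaps(array):
--     """
--     Obtains positions of gaps (sequences of zeroes)
--     in an array
--     """
--     in_gap = False
--     gapl = -1
--     gapr = -1
--     gaps = []
--     for ki, val in enumerate(array):
--         if val != 0:
--             if in_gap == True:
--                 gapr = ki
--                 gaps.append([gapl, gapr])
--
--             in_gap = False
--         else:
--             if in_gap == False:
--                 gapl = ki
--             in_gap = True
--     if in_gap == True:
--         gapr = len(array)
--         gaps.append([gapl, gapr])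
--     return gaps
-- ===== SOURCE B (Python) =====
-- def get_weight_array_gaps(array):
--     """
--     Obtains positions of gaps (sequences of zeroes)
--     in an array
--     """
--     gaps = []
--     n = len(array)
--     i = 0
--     while i < n:
--         if array[i] != 0:
--             i += 1
--         else:
--             j = i + 1
--             while j < n and array[j] == 0:
--                 j += 1
--             gaps.append([i, j])
--             i = j
--     return gaps
-- ===== Notes on version B (the rewrite author's own statement) =====
-- stated objective: alternative
-- what changed: Replaces the in_gap/gapl/gapr transition-detecting state machine with a run-consuming two-level scan: skip nonzeros, then an inner scan consumes each whole zero-run and emits [start, end] immediately, so no flag state or trailing-run fixup is needed.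
import Mathlib
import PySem

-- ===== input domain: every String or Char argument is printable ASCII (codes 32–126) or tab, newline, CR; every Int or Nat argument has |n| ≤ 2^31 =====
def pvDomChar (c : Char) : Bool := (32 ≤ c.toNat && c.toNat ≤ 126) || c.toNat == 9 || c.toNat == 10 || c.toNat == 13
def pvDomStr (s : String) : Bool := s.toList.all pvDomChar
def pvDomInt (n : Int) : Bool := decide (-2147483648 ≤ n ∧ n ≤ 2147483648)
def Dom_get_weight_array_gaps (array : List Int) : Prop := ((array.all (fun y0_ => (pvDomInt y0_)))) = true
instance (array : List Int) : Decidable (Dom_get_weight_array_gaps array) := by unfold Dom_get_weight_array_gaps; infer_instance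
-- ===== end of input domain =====

-- B replaces A's in_gap/gapl/gapr transition-detecting state machine by a run-consuming
-- two-level scan (skip nonzeros, consume each whole zero-run, emit immediately); same O(n) cost.

-- ===== PORT A =====
-- one iteration of A's for-loop body; state = (in_gap, gapl, gapr, gaps)
def aStep (s : Bool × Int × Int × List (List Int)) (p : Int × Int) :
    Bool × Int × Int × List (List Int) :=
  match s, p with
  | (in_gap, gapl, gapr, gaps), (ki, val) =>
    if val ≠ 0 then
      if in_gap = true then (false, gapl, ki, gaps ++ [[gapl, ki]])
      else (false, gapl, gapr, gaps)
    else
      if in_gap = false then (true, ki, gapr, gaps)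
      else (true, gapl, gapr, gaps)

def get_weight_array_gaps (array : List Int) : List (List Int) :=
  let s := (PySem.List.enumerate array).foldl aStep (false, -1, -1, [])
  if s.1 = true then s.2.2.2 ++ [[s.2.1, (array.length : Int)]] else s.2.2.2

-- ===== PORT B =====
-- B's outer while-loop as recursion over the remaining list, carrying the index i;
-- the inner while (scanning the zero-run past position i) is the takeWhile.
def bGo (xs : List Int) (i : Int) : List (List Int) :=
  match xs with
  | [] => []
  | x :: rest =>
    if x ≠ 0 then bGo rest (i + 1)
    else
      let t := rest.takeWhile (fun v => v == 0)
      [i, i + 1 + t.length] :: bGo (rest.drop t.length) (i + 1 + t.length)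
termination_by xs.length
decreasing_by
  all_goals simp_all

def get_weight_array_gaps_alt (array : List Int) : List (List Int) := bGo array 0

-- ===== PRECONDITION & SPEC =====
def Spec_get_weight_array_gaps (array : List Int) (out : List (List Int)) : Prop := out = get_weight_array_gaps_alt array
instance (array : List Int) (out : List (List Int)) : Decidable (Spec_get_weight_array_gaps array out) := by unfold Spec_get_weight_array_gaps; infer_instance

-- ===== CLAIM (what is proved, stated in full; the proofs are below) =====
def Claim_equal_get_weight_array_gaps : Prop := ∀ (array : List Int), Dom_get_weight_array_gaps array → Spec_get_weight_array_gaps array (get_weight_array_gaps array)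

-- ===== LEMMAS AND PROOFS =====

theorem bGo_nil (i : Int) : bGo [] i = [] := by
  rw [bGo.eq_def]

theorem bGo_cons_ne (x : Int) (rest : List Int) (i : Int) (hx : x ≠ 0) :
    bGo (x :: rest) i = bGo rest (i + 1) := by
  rw [bGo.eq_def]; simp [hx]

theorem bGo_cons_zero (rest : List Int) (i : Int) :
    bGo (0 :: rest) i =
      [i, i + 1 + ((rest.takeWhile (fun v => v == 0)).length : Int)] ::
        bGo (rest.drop (rest.takeWhile (fun v => v == 0)).length)
          (i + 1 + ((rest.takeWhile (fun v => v == 0)).length : Int)) := by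
  rw [bGo.eq_def]; simp

-- A's behaviour while inside a gap opened at gapl, seen from index i onward.
def contGap (gapl i : Int) : List Int → List (List Int)
  | [] => [[gapl, i]]
  | x :: rest =>
    if x ≠ 0 then [gapl, i] :: bGo rest (i + 1)
    else contGap gapl (i + 1) rest

-- finalization of A's loop state when n is the array length
def aFin (s : Bool × Int × Int × List (List Int)) (n : Int) : List (List Int) :=
  if s.1 = true then s.2.2.2 ++ [[s.2.1, n]] else s.2.2.2

theorem contGap_eq (xs : List Int) : ∀ (gl i : Int),
    contGap gl i xs =
      [gl, i + ((xs.takeWhile (fun v => v == 0)).length : Int)] ::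
        bGo (xs.drop (xs.takeWhile (fun v => v == 0)).length)
          (i + ((xs.takeWhile (fun v => v == 0)).length : Int)) := by
  induction xs with
  | nil => intro gl i; simp [contGap, bGo_nil]
  | cons x rest ih =>
    intro gl i
    by_cases hx : x = 0
    · subst hx
      have hstep : contGap gl i ((0:Int) :: rest) = contGap gl (i + 1) rest := by
        simp [contGap]
      rw [hstep, ih gl (i + 1)]
      have harith : i + 1 + ((rest.takeWhile (fun v => v == 0)).length : Int)
          = i + (((rest.takeWhile (fun v => v == 0)).length : Nat) + 1 : Nat) := by
        push_cast; ring
      simp [List.takeWhile, harith]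
    · have hb : (x == (0:Int)) = false := by simp [hx]
      simp [contGap, List.takeWhile, hx, hb, bGo_cons_ne x rest i hx]

theorem bGo_zero_eq (rest : List Int) (i : Int) :
    bGo (0 :: rest) i = contGap i i (0 :: rest) := by
  rw [contGap_eq, bGo_cons_zero]
  have harith : i + 1 + ((rest.takeWhile (fun v => v == 0)).length : Int)
      = i + (((rest.takeWhile (fun v => v == 0)).length : Nat) + 1 : Nat) := by
    push_cast; ring
  simp [List.takeWhile, harith]

theorem aLoop_eq (xs : List Int) : ∀ (i gl gr : Int) (gaps : List (List Int)),
    (aFin ((PySem.List.enumerate xs i).foldl aStep (false, gl, gr, gaps)) (i + xs.length)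
        = gaps ++ bGo xs i) ∧
    (aFin ((PySem.List.enumerate xs i).foldl aStep (true, gl, gr, gaps)) (i + xs.length)
        = gaps ++ contGap gl i xs) := by
  induction xs with
  | nil => intro i gl gr gaps; simp [PySem.List.enumerate_nil, aFin, bGo_nil, contGap]
  | cons x rest ih =>
    intro i gl gr gaps
    by_cases hx : x = 0
    · subst hx
      constructor
      · -- not in gap, hits a zero: opens gap at i
        rw [PySem.List.enumerate_cons]
        simp only [List.foldl_cons, aStep, ne_eq, not_true_eq_false, if_false, reduceIte]
        have h := (ih (i + 1) i gr gaps).2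
        rw [bGo_zero_eq]
        calc aFin ((PySem.List.enumerate rest (i + 1)).foldl aStep (true, i, gr, gaps))
              (i + ((0:Int) :: rest).length)
            = aFin ((PySem.List.enumerate rest (i + 1)).foldl aStep (true, i, gr, gaps))
              ((i + 1) + rest.length) := by
              congr 1; push_cast [List.length_cons]; ring
          _ = gaps ++ contGap i (i + 1) rest := h
          _ = gaps ++ contGap i i ((0:Int) :: rest) := by simp [contGap]
      · -- in gap, zero: stays in gap
        rw [PySem.List.enumerate_cons]
        simp only [List.foldl_cons, aStep, ne_eq, not_true_eq_false, if_false, reduceIte]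
        have h := (ih (i + 1) gl gr gaps).2
        calc aFin ((PySem.List.enumerate rest (i + 1)).foldl aStep (true, gl, gr, gaps))
              (i + ((0:Int) :: rest).length)
            = aFin ((PySem.List.enumerate rest (i + 1)).foldl aStep (true, gl, gr, gaps))
              ((i + 1) + rest.length) := by
              congr 1; push_cast [List.length_cons]; ring
          _ = gaps ++ contGap gl (i + 1) rest := h
          _ = gaps ++ contGap gl i ((0:Int) :: rest) := by simp [contGap]
    · constructor
      · -- not in gap, nonzero: nothing happens
        rw [PySem.List.enumerate_cons]
        simp only [List.foldl_cons, aStep, hx, ne_eq, not_false_eq_true, if_true]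
        have h := (ih (i + 1) gl gr gaps).1
        calc aFin ((PySem.List.enumerate rest (i + 1)).foldl aStep (false, gl, gr, gaps))
              (i + ((x :: rest).length : Int))
            = aFin ((PySem.List.enumerate rest (i + 1)).foldl aStep (false, gl, gr, gaps))
              ((i + 1) + rest.length) := by
              congr 1; push_cast [List.length_cons]; ring
          _ = gaps ++ bGo rest (i + 1) := h
          _ = gaps ++ bGo (x :: rest) i := by rw [bGo_cons_ne x rest i hx]
      · -- in gap, nonzero: closes the gap [gl, i]
        rw [PySem.List.enumerate_cons]
        simp only [List.foldl_cons, aStep, hx, ne_eq, not_false_eq_true, if_true]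
        have h := (ih (i + 1) gl i (gaps ++ [[gl, i]])).1
        calc aFin ((PySem.List.enumerate rest (i + 1)).foldl aStep
              (false, gl, i, gaps ++ [[gl, i]])) (i + ((x :: rest).length : Int))
            = aFin ((PySem.List.enumerate rest (i + 1)).foldl aStep
              (false, gl, i, gaps ++ [[gl, i]])) ((i + 1) + rest.length) := by
              congr 1; push_cast [List.length_cons]; ring
          _ = (gaps ++ [[gl, i]]) ++ bGo rest (i + 1) := h
          _ = gaps ++ contGap gl i (x :: rest) := by
              simp [contGap, hx, List.append_assoc]

-- ===== VERDICT (by name: the statement is the Claim_ definition above) =====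
theorem get_weight_array_gaps_spec : Claim_equal_get_weight_array_gaps := by
  intro array _
  unfold Spec_get_weight_array_gaps get_weight_array_gaps get_weight_array_gaps_alt
  have h := (aLoop_eq array 0 (-1) (-1) []).1
  simpa [aFin] using h
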